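-- pv_equiv track=rewrite | github.com/mahiroaug/RADIUS-Bot | bot/utils/radius.py | _sanitize_lines
-- ===== SOURCE A (Python) =====
-- from typing import Dict, List, Optional, Tuple
--
-- def _sanitize_lines(lines: List[str]) -> List[str]:
--     """
--     孤立したインデント行（ユーザーやDEFAULTヘッダに紐づかない属性行）を除去。
--     ついでに連続する空行を1つに圧縮。
--
--     Args:
--         lines: 現在のauthorize行群
--
--     Returns:
--         サニタイズ後の行群
--     """
--     sanitized: List[str] = []
--     inside_header = False
--     prev_blank = False
--
--     for raw in lines:
--         if raw.startswith('\t') or raw.startswith(' '):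
--             if not inside_header:
--                 # 孤立した属性行はスキップ
--                 continue
--             sanitized.append(raw)
--             prev_blank = False
--             continue
--
--         # 非インデント行
--         stripped = raw.strip()
--         if stripped == "":
--             if prev_blank:
--                 # 空行を圧縮
--                 continue
--             sanitized.append(raw)
--             prev_blank = True
--             inside_header = False
--             continue
--
--         sanitized.append(raw)
--         prev_blank = False
--         # コメント行はヘッダ開始扱いにしない
--         inside_header = not stripped.startswith('#')
--
--     return sanitized
-- ===== SOURCE B (Python) =====
-- from typing import Dict, List, Optional, Tuple
--
-- def _sanitize_lines(lines: List[str]) -> List[str]: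
--     # Pass 1: drop orphan indent lines, tracking only whether we are inside a header block.
--     kept: List[str] = []
--     inside_header = False
--     for raw in lines:
--         if raw.startswith('\t') or raw.startswith(' '):
--             if inside_header:
--                 kept.append(raw)
--             continue
--         kept.append(raw)
--         stripped = raw.strip()
--         inside_header = stripped != "" and not stripped.startswith('#')
--     # Pass 2: compress runs of blank (non-indented, whitespace-only) lines.
--     out: List[str] = []
--     prev_blank = False
--     for line in kept:
--         blank = not (line.startswith('\t') or line.startswith(' ')) and line.strip() == ""
--         if blank and prev_blank:
--             continue
--         out.append(line)
--         prev_blank = blank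
--     return out
-- ===== Notes on version B (the rewrite author's own statement) =====
-- stated objective: alternative
-- what changed: A's single loop juggling inside_header and prev_blank together is split into two independent passes: pass 1 drops orphan indent lines tracking only inside_header, pass 2 compresses runs of blank (non-indented whitespace-only) lines tracking only prev_blank.
import Mathlib
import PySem

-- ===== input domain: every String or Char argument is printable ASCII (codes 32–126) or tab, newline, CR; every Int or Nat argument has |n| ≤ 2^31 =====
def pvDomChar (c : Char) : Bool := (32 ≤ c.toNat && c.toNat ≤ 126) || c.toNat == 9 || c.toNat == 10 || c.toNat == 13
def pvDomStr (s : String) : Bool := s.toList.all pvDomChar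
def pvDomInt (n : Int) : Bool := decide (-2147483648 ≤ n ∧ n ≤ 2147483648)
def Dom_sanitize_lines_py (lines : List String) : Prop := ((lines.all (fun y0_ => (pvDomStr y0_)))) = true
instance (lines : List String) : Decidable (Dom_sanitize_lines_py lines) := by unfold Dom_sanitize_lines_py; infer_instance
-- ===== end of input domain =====

-- B restructures A's single stateful loop into two passes (header tracking, then blank-run compression); objective: simpler decomposition, same cost.

-- ===== PORT A =====
-- A's single loop: state (inside_header, prev_blank), one pass over lines.
def saLoop : List String → Bool → Bool → List String
  | [], _, _ => []
  | raw :: rest, inside_header, prev_blank =>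
    if PySem.Str.startswith raw "\t" || PySem.Str.startswith raw " " then
      if !inside_header then
        saLoop rest inside_header prev_blank
      else
        raw :: saLoop rest inside_header false
    else
      let stripped := PySem.Str.strip raw
      if stripped == "" then
        if prev_blank then
          saLoop rest inside_header prev_blank
        else
          raw :: saLoop rest false true
      else
        raw :: saLoop rest (!(PySem.Str.startswith stripped "#")) false

def sanitize_lines_py (lines : List String) : List String := saLoop lines false false

-- ===== PORT B =====
-- Pass 1 of Source B: drop orphan indent lines, tracking only inside_header.
def sbPass1 : List String → Bool → List String
  | [], _ => []
  | raw :: rest, inside_header =>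
    if PySem.Str.startswith raw "\t" || PySem.Str.startswith raw " " then
      if inside_header then raw :: sbPass1 rest inside_header
      else sbPass1 rest inside_header
    else
      let stripped := PySem.Str.strip raw
      raw :: sbPass1 rest (!(stripped == "") && !(PySem.Str.startswith stripped "#"))

-- Pass 2 of Source B: a line is "blank" iff non-indented and whitespace-only.
def sbBlank (line : String) : Bool :=
  !(PySem.Str.startswith line "\t" || PySem.Str.startswith line " ") && (PySem.Str.strip line == "")

def sbPass2 : List String → Bool → List String
  | [], _ => []
  | line :: rest, prev_blank =>
    let blank := sbBlank line
    if blank && prev_blank then sbPass2 rest prev_blank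
    else line :: sbPass2 rest blank

def sanitize_lines_py_alt (lines : List String) : List String :=
  sbPass2 (sbPass1 lines false) false

-- ===== PRECONDITION & SPEC =====
def Spec_sanitize_lines_py (lines : List String) (out : List String) : Prop := out = sanitize_lines_py_alt lines
instance (lines : List String) (out : List String) : Decidable (Spec_sanitize_lines_py lines out) := by unfold Spec_sanitize_lines_py; infer_instance

-- ===== CLAIM (what is proved, stated in full; the proofs are below) =====
def Claim_equal_sanitize_lines_py : Prop := ∀ (lines : List String), Dom_sanitize_lines_py lines → Spec_sanitize_lines_py lines (sanitize_lines_py lines)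

-- ===== LEMMAS AND PROOFS =====

-- Invariant: once prev_blank is set, inside_header is false; under it A's one pass equals B's two passes.
theorem saLoop_eq_passes : ∀ (lines : List String) (ih pb : Bool),
    (pb = true → ih = false) → saLoop lines ih pb = sbPass2 (sbPass1 lines ih) pb := by
  intro lines
  induction lines with
  | nil => intro ih pb _; rfl
  | cons raw rest IH =>
    intro ih pb hpi
    by_cases hInd : (PySem.Chars.startswith raw.toList ['\t'] = true ∨
        PySem.Chars.startswith raw.toList [' '] = true)
    · cases ih with
      | false =>
        simp [saLoop, sbPass1, hInd]
        exact IH false pb hpi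
      | true =>
        have hpb : pb = false := by
          cases pb with
          | false => rfl
          | true => exact absurd (hpi rfl) (by simp)
        subst hpb
        rcases hInd with hT | hS
        · simp [saLoop, sbPass1, sbPass2, sbBlank, hT]
          exact IH true false (by simp)
        · simp [saLoop, sbPass1, sbPass2, sbBlank, hS]
          exact IH true false (by simp)
    · simp only [not_or, Bool.not_eq_true] at hInd
      obtain ⟨hT, hS⟩ := hInd
      by_cases hStr : PySem.Str.strip raw = ""
      · cases pb with
        | true =>
          have hih : ih = false := hpi rfl
          subst hih
          simp [saLoop, sbPass1, sbPass2, sbBlank, hT, hS, hStr]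
          exact IH false true (fun _ => rfl)
        | false =>
          simp [saLoop, sbPass1, sbPass2, sbBlank, hT, hS, hStr]
          exact IH false true (fun _ => rfl)
      · have hStr' : (PySem.Str.strip raw == "") = false := by simpa using hStr
        simp [saLoop, sbPass1, sbPass2, sbBlank, hT, hS, hStr']
        exact IH _ false (by simp)

-- ===== VERDICT (by name: the statement is the Claim_ definition above) =====
theorem sanitize_lines_py_spec : Claim_equal_sanitize_lines_py := by
  intro lines _
  unfold Spec_sanitize_lines_py sanitize_lines_py sanitize_lines_py_alt
  exact saLoop_eq_passes lines false false (by simp)
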